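-- pv_equiv track=rewrite | github.com/XMY-ONE-LIFE/xadmin_zx | xadmin_auth/yaml_validator.py | find_line_number_in_yaml
-- ===== SOURCE A (Python) =====
-- from typing import Dict, List, Any, Optional, Tuple
--
-- def find_line_number_in_yaml(yaml_content: str, field_path: str) -> Optional[int]:
--     """
--     在 YAML 文本中查找字段所在的行号
--     """
--     if not yaml_content:
--         return None
--
--     # 提取最后一级的键名
--     keys = field_path.split('.')
--     last_key = keys[-1]
--
--     lines = yaml_content.split('\n')
--     for i, line in enumerate(lines):
--         # 匹配 "key:" 或 "key: value" 模式
--         if f'{last_key}:' in line: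
--             return i + 1  # 返回 1-based 行号
--
--     return None
-- ===== SOURCE B (Python) =====
-- def find_line_number_in_yaml(yaml_content, field_path):
--     last_key = field_path.split('.')[-1]
--     pos = yaml_content.find(f'{last_key}:')
--     if pos < 0:
--         return None
--     return yaml_content[:pos].count('\n') + 1
-- ===== Notes on version B (the rewrite author's own statement) =====
-- stated objective: idiomatic
-- what changed: Replaces the split-into-lines-and-scan-each-line loop by a single whole-string find of 'key:' followed by counting the newlines before the hit to derive the 1-based line number.
-- outside the precondition, e.g. on find_line_number_in_yaml('a\nb:', 'a\nb'): A returns None, B returns 1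
import Mathlib
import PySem

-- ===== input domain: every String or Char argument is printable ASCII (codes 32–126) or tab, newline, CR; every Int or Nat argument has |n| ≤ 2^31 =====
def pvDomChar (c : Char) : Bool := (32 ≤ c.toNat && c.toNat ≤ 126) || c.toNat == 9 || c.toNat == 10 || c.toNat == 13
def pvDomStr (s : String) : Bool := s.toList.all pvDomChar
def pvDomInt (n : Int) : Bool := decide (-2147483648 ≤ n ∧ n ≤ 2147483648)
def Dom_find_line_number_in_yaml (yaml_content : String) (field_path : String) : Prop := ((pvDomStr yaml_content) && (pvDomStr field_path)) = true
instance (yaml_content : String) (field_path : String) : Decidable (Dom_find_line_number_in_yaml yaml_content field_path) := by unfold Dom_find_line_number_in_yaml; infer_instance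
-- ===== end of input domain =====

-- B replaces A's split-into-lines-and-scan loop by a single whole-string find of "key:" plus a
-- count of the newlines before the hit (idiomatic; same O(n) cost). Return values only.

-- ===== PORT A =====
-- the 'for i, line in enumerate(lines): if needle in line: return i + 1' loop
def pvLoopA (needle : List Char) : List (List Char) → Nat → Option Int
  | [], _ => none
  | l :: ls, i => if PySem.Chars.isIn needle l then some ((i : Int) + 1) else pvLoopA needle ls (i + 1)

def find_line_number_in_yaml (yaml_content : String) (field_path : String) : Option Int :=
  if yaml_content.toList = [] then none   -- 'if not yaml_content: return None'
  else
    let keys := PySem.Chars.splitOn field_path.toList ['.']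
    -- keys[-1]: split('.') never returns an empty list, so Python's IndexError is unreachable
    let last_key := keys.getLastD []
    pvLoopA (last_key ++ [':']) (PySem.Chars.splitOn yaml_content.toList ['\n']) 0

-- ===== PORT B =====
def find_line_number_in_yaml_alt (yaml_content : String) (field_path : String) : Option Int :=
  let last_key := (PySem.Chars.splitOn field_path.toList ['.']).getLastD []   -- field_path.split('.')[-1]
  let pos := PySem.Chars.find yaml_content.toList (last_key ++ [':'])          -- yaml_content.find(f'{last_key}:')
  if pos < 0 then none
  -- yaml_content[:pos] with 0 ≤ pos ≤ len(yaml_content) is exactly List.take pos.toNat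
  else some ((PySem.Chars.count (yaml_content.toList.take pos.toNat) ['\n'] : Int) + 1)

-- ===== PRECONDITION & SPEC =====
-- Pre_ excludes inputs where the last '.'-segment of field_path contains a newline AND
-- 'last_key:' occurs in yaml_content: such a key can never sit inside a single split line, so A
-- returns None while B's whole-string search matches it across a line break — a degenerate
-- corner (a YAML key containing a newline) on which either behaviour is defensible.
def Pre_find_line_number_in_yaml (yaml_content : String) (field_path : String) : Prop :=
  ¬ ('\n' ∈ (PySem.Chars.splitOn field_path.toList ['.']).getLastD [] ∧
     PySem.Chars.isIn ((PySem.Chars.splitOn field_path.toList ['.']).getLastD [] ++ [':']) yaml_content.toList = true)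
instance (yaml_content : String) (field_path : String) : Decidable (Pre_find_line_number_in_yaml yaml_content field_path) := by unfold Pre_find_line_number_in_yaml; infer_instance

def pvWitness_find_line_number_in_yaml : String × String := ("a: 1\nbc: 2", "top.bc")

def Spec_find_line_number_in_yaml (yaml_content : String) (field_path : String) (out : Option Int) : Prop := out = find_line_number_in_yaml_alt yaml_content field_path
instance (yaml_content : String) (field_path : String) (out : Option Int) : Decidable (Spec_find_line_number_in_yaml yaml_content field_path out) := by unfold Spec_find_line_number_in_yaml; infer_instance

-- ===== CLAIM (what is proved, stated in full; the proofs are below) =====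
def Claim_equal_find_line_number_in_yaml : Prop := ∀ (yaml_content : String) (field_path : String), Dom_find_line_number_in_yaml yaml_content field_path → Pre_find_line_number_in_yaml yaml_content field_path → Spec_find_line_number_in_yaml yaml_content field_path (find_line_number_in_yaml yaml_content field_path)

-- ===== LEMMAS AND PROOFS =====

-- simple structural model of s.split('\n')
def pvSplitNL : List Char → List (List Char)
  | [] => [[]]
  | c :: t => if c = '\n' then [] :: pvSplitNL t else (pvSplitNL t).modifyHead (c :: ·)

theorem pvSplitNL_ne_nil (s : List Char) : pvSplitNL s ≠ [] := by
  cases s with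
  | nil => simp [pvSplitNL]
  | cons c t =>
    simp only [pvSplitNL]
    split_ifs
    · simp
    · intro h
      exact pvSplitNL_ne_nil t (by cases hh : pvSplitNL t <;> simp [hh] at h ⊢)

theorem pv_splitOn_go_nl (fuel : ℕ) : ∀ (l cur : List Char) (acc : List (List Char)),
    l.length ≤ fuel →
    PySem.Chars.splitOn.go ['\n'] fuel l cur acc
      = acc.reverse ++ (pvSplitNL l).modifyHead (cur.reverse ++ ·) := by
  induction fuel with
  | zero =>
    intro l cur acc h
    interval_cases hl : l.length
    have : l = [] := List.length_eq_zero_iff.mp hl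
    subst this
    simp [PySem.Chars.splitOn.go, pvSplitNL]
  | succ fuel ih =>
    intro l cur acc h
    cases l with
    | nil => simp [PySem.Chars.splitOn.go, pvSplitNL]
    | cons c rest =>
      simp only [PySem.Chars.splitOn.go]
      by_cases hc : c = '\n'
      · subst hc
        rw [if_pos (by simp [List.isPrefixOf])]
        rw [ih _ _ _ (by simpa using Nat.le_of_succ_le_succ (by simpa using h))]
        obtain ⟨h0, t0, ht⟩ := List.exists_cons_of_ne_nil (pvSplitNL_ne_nil rest)
        simp [pvSplitNL, ht, List.modifyHead]
      · rw [if_neg (by simp [List.isPrefixOf]; intro hh; exact hc hh.symm)]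
        rw [ih _ _ _ (by simpa using h)]
        obtain ⟨h0, t0, ht⟩ := List.exists_cons_of_ne_nil (pvSplitNL_ne_nil rest)
        simp [pvSplitNL, hc, ht, List.modifyHead]

theorem pv_splitOn_nl (s : List Char) : PySem.Chars.splitOn s ['\n'] = pvSplitNL s := by
  show PySem.Chars.splitOn.go _ _ _ _ _ = _
  rw [pv_splitOn_go_nl (s.length + 1) s [] [] (by omega)]
  obtain ⟨h0, t0, ht⟩ := List.exists_cons_of_ne_nil (pvSplitNL_ne_nil s)
  simp [ht, List.modifyHead]

theorem pv_count_go_singleton (c : Char) (fuel : ℕ) : ∀ (l : List Char) (acc : ℕ),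
    l.length ≤ fuel → PySem.Chars.count.go [c] fuel l acc = acc + l.count c := by
  induction fuel with
  | zero =>
    intro l acc h
    have : l = [] := List.length_eq_zero_iff.mp (by omega)
    subst this; simp [PySem.Chars.count.go]
  | succ fuel ih =>
    intro l acc h
    cases l with
    | nil => simp [PySem.Chars.count.go]
    | cons d t =>
      simp only [PySem.Chars.count.go]
      by_cases hd : c = d
      · subst hd
        rw [if_pos (by simp [List.isPrefixOf])]
        rw [ih _ _ (by simpa using h)]
        simp
        omega
      · rw [if_neg (by simp [List.isPrefixOf]; exact hd)]
        rw [ih _ _ (by simpa using h)]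
        simp [Ne.symm hd]

theorem pv_count_singleton (s : List Char) (c : Char) :
    PySem.Chars.count s [c] = s.count c := by
  show (if _ then _ else PySem.Chars.count.go _ _ _ _) = _
  rw [if_neg (by simp)]
  simpa using pv_count_go_singleton c s.length s 0 le_rfl

theorem pv_find_eq_of (s sub : List Char) (n : ℕ) (hp : sub <+: s.drop n)
    (hmin : ∀ i < n, ¬ sub <+: s.drop i) : PySem.Chars.find s sub = (n : Int) := by
  have hin : sub <:+: s := (PySem.Chars.isIn_iff_infix _ _).mp ((PySem.Chars.exists_prefix_drop_iff_isIn _ _).mp ⟨n, hp⟩)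
  have h0 : 0 ≤ PySem.Chars.find s sub := (PySem.Chars.find_nonneg_iff s sub).mpr hin
  obtain ⟨hp', hmin'⟩ := PySem.Chars.find_spec h0
  have h1 : ¬ (PySem.Chars.find s sub).toNat < n := fun hlt => hmin _ hlt hp'
  have h2 : ¬ n < (PySem.Chars.find s sub).toNat := fun hlt => hmin' _ hlt hp
  omega

theorem pv_prefix_split (needle a b : List Char) (hn : '\n' ∉ needle)
    (h : needle <+: a ++ '\n' :: b) : needle <+: a := by
  by_cases hl : needle.length ≤ a.length
  · exact List.prefix_of_prefix_length_le h (List.prefix_append _ _) hl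
  · exfalso
    apply hn
    have hg : (a ++ '\n' :: b)[a.length]'(by simp) = '\n' := by simp
    have := h.getElem (i := a.length) (by omega)
    have h3 : needle[a.length]'(by omega) = '\n' := this.trans hg
    rw [← h3]
    exact List.getElem_mem _

theorem pv_decomp (s : List Char) :
    ('\n' ∉ s ∧ pvSplitNL s = [s]) ∨
    ∃ a b, s = a ++ '\n' :: b ∧ '\n' ∉ a ∧ pvSplitNL s = a :: pvSplitNL b := by
  induction s with
  | nil => exact Or.inl ⟨by simp, rfl⟩
  | cons c t ih =>
    by_cases hc : c = '\n'
    · subst hc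
      exact Or.inr ⟨[], t, by simp, by simp, by simp [pvSplitNL]⟩
    · rcases ih with ⟨hnl, ht⟩ | ⟨a, b, heq, ha, ht⟩
      · exact Or.inl ⟨by simp [hnl, Ne.symm hc], by simp [pvSplitNL, hc, ht]⟩
      · exact Or.inr ⟨c :: a, b, by simp [heq], by simp [ha, Ne.symm hc], by simp [pvSplitNL, hc, ht]⟩

theorem pv_main (needle : List Char) (hnl : '\n' ∉ needle) (hne : needle ≠ []) :
    ∀ (s : List Char) (k : ℕ),
      pvLoopA needle (pvSplitNL s) k
        = if PySem.Chars.find s needle = -1 then none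
          else some ((k : Int) + 1 + ((s.take (PySem.Chars.find s needle).toNat).count '\n' : Int)) := by
  suffices H : ∀ (n : ℕ) (s : List Char), s.length ≤ n → ∀ (k : ℕ),
      pvLoopA needle (pvSplitNL s) k
        = if PySem.Chars.find s needle = -1 then none
          else some ((k : Int) + 1 + ((s.take (PySem.Chars.find s needle).toNat).count '\n' : Int)) by
    exact fun s k => H s.length s le_rfl k
  intro n
  induction n with
  | zero =>
    intro s hs k
    have : s = [] := List.length_eq_zero_iff.mp (by omega)
    subst this
    rw [if_pos ((PySem.Chars.find_eq_neg_one_iff _ _).mpr (by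
      intro hin; exact hne (List.eq_nil_of_infix_nil hin)))]
    simp [pvSplitNL, pvLoopA, (PySem.Chars.isIn_eq_false_iff _ _).mpr (by
      intro hin; exact hne (List.eq_nil_of_infix_nil hin))]
  | succ n ih =>
    intro s hs k
    rcases pv_decomp s with ⟨hno, hsp⟩ | ⟨a, b, heq, ha, hsp⟩
    · -- no newline in s: one line
      rw [hsp]
      by_cases hin : PySem.Chars.isIn needle s
      · have hinf : needle <:+: s := (PySem.Chars.isIn_iff_infix _ _).mp hin
        have h0 : 0 ≤ PySem.Chars.find s needle := (PySem.Chars.find_nonneg_iff _ _).mpr hinf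
        rw [if_neg (by omega)]
        have hcnt : (s.take (PySem.Chars.find s needle).toNat).count '\n' = 0 :=
          List.count_eq_zero.mpr (fun hmem => hno (List.mem_of_mem_take hmem))
        simp [pvLoopA, hin, hcnt]
      · rw [if_pos ((PySem.Chars.find_eq_neg_one_iff _ _).mpr
          (fun hinf => hin ((PySem.Chars.isIn_iff_infix _ _).mpr hinf)))]
        simp [pvLoopA, hin]
    · subst heq
      rw [hsp]
      by_cases hin : PySem.Chars.isIn needle a
      · -- first line matches
        have hinf : needle <:+: a := (PySem.Chars.isIn_iff_infix _ _).mp hin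
        have h0a : 0 ≤ PySem.Chars.find a needle := (PySem.Chars.find_nonneg_iff _ _).mpr hinf
        obtain ⟨hpa, _⟩ := PySem.Chars.find_spec h0a
        set j := (PySem.Chars.find a needle).toNat with hj
        have hjlen : j + needle.length ≤ a.length := by
          have hlen := hpa.length_le
          rw [List.length_drop] at hlen
          have hj2 : j ≤ a.length := by
            have := PySem.Chars.find_le_length a needle
            omega
          have : needle.length ≠ 0 := fun h => hne (List.eq_nil_of_length_eq_zero h)
          omega
        -- occurrence at j in the whole string
        have hps : needle <+: (a ++ '\n' :: b).drop j := by
          rw [List.drop_append_of_le_length (by omega)]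
          exact hpa.trans (List.prefix_append _ _)
        have h0 : 0 ≤ PySem.Chars.find (a ++ '\n' :: b) needle :=
          (PySem.Chars.find_nonneg_iff _ _).mpr
            ((PySem.Chars.isIn_iff_infix _ _).mp ((PySem.Chars.exists_prefix_drop_iff_isIn _ _).mp ⟨j, hps⟩))
        obtain ⟨_, hmins⟩ := PySem.Chars.find_spec h0
        set m := (PySem.Chars.find (a ++ '\n' :: b) needle).toNat with hm
        have hmj : m ≤ j := by
          by_contra hlt
          exact hmins j (by omega) hps
        have htake : (a ++ '\n' :: b).take m = a.take m :=
          List.take_append_of_le_length (by omega)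
        have hcnt : ((a ++ '\n' :: b).take m).count '\n' = 0 := by
          rw [htake]
          exact List.count_eq_zero.mpr (fun hmem => ha (List.mem_of_mem_take hmem))
        rw [if_neg (by omega)]
        simp [pvLoopA, hin, hcnt]
      · -- first line does not match
        have hnin : ¬ needle <:+: a := fun hinf => hin ((PySem.Chars.isIn_iff_infix _ _).mpr hinf)
        have hclaimA : ∀ i ≤ a.length, ¬ needle <+: (a ++ '\n' :: b).drop i := by
          intro i hi hp
          rw [List.drop_append_of_le_length hi] at hp
          exact hnin ((pv_prefix_split needle _ _ hnl hp).isInfix.trans (a.drop_suffix i).isInfix)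
        have hclaimB : ∀ j : ℕ, (a ++ '\n' :: b).drop (a.length + 1 + j) = b.drop j := by
          intro j
          have : a.length + 1 + j = a.length + (1 + j) := by omega
          rw [this, List.drop_length_add_append, Nat.add_comm 1 j, List.drop_succ_cons]
        have hblen : b.length ≤ n := by
          simp at hs
          omega
        by_cases hfb : PySem.Chars.find b needle = -1
        · have hnone : PySem.Chars.find (a ++ '\n' :: b) needle = -1 := by
            rw [PySem.Chars.find_eq_neg_one_iff]
            intro hinf
            obtain ⟨i, hp⟩ := (PySem.Chars.exists_prefix_drop_iff_isIn _ _).mpr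
              ((PySem.Chars.isIn_iff_infix _ _).mpr hinf)
            by_cases hi : i ≤ a.length
            · exact hclaimA i hi hp
            · have : needle <+: b.drop (i - (a.length + 1)) := by
                rw [← hclaimB (i - (a.length + 1))]
                have : a.length + 1 + (i - (a.length + 1)) = i := by omega
                rw [this]
                exact hp
              exact (PySem.Chars.find_eq_neg_one_iff _ _).mp hfb
                (this.isInfix.trans (b.drop_suffix _).isInfix)
            --
          rw [if_pos hnone]
          have hih := ih b hblen (k + 1)
          rw [if_pos hfb] at hih
          simp [pvLoopA, hin, hih]
        · have h0b : 0 ≤ PySem.Chars.find b needle := by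
            have := PySem.Chars.neg_one_le_find b needle
            omega
          obtain ⟨hpb, hminb⟩ := PySem.Chars.find_spec h0b
          set fb := (PySem.Chars.find b needle).toNat with hfbn
          have hfind : PySem.Chars.find (a ++ '\n' :: b) needle = ((a.length + 1 + fb : ℕ) : Int) := by
            apply pv_find_eq_of
            · rw [hclaimB fb]; exact hpb
            · intro i hilt hp
              by_cases hi : i ≤ a.length
              · exact hclaimA i hi hp
              · have hib : needle <+: b.drop (i - (a.length + 1)) := by
                  have h2 : a.length + 1 + (i - (a.length + 1)) = i := by omega
                  rw [← hclaimB (i - (a.length + 1)), h2]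
                  exact hp
                exact hminb (i - (a.length + 1)) (by omega) hib
          rw [if_neg (by rw [hfind]; omega)]
          rw [hfind]
          have htk : (a ++ '\n' :: b).take (((a.length + 1 + fb : ℕ) : Int)).toNat
              = a ++ '\n' :: b.take fb := by
            rw [Int.toNat_natCast]
            have h2 : a.length + 1 + fb = a.length + (1 + fb) := by omega
            rw [h2, List.take_length_add_append, Nat.add_comm 1 fb, List.take_succ_cons]
          rw [htk]
          have hih := ih b hblen (k + 1)
          rw [if_neg hfb] at hih
          have hca : a.count '\n' = 0 := List.count_eq_zero.mpr ha
          simp [pvLoopA, hin, hih, List.count_append, hca]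
          ring
  --

-- no piece of pvSplitNL contains a newline
theorem pv_splitNL_no_nl (s : List Char) : ∀ l ∈ pvSplitNL s, '\n' ∉ l := by
  induction s with
  | nil => simp [pvSplitNL]
  | cons c t ih =>
    intro l hl
    by_cases hc : c = '\n'
    · subst hc
      simp [pvSplitNL] at hl
      rcases hl with rfl | hl
      · simp
      · exact ih l hl
    · obtain ⟨h0, t0, ht⟩ := List.exists_cons_of_ne_nil (pvSplitNL_ne_nil t)
      simp only [pvSplitNL, if_neg hc, ht, List.modifyHead, List.mem_cons] at hl
      rcases hl with rfl | hl
      · intro hmem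
        rcases List.mem_cons.mp hmem with rfl | hmem
        · exact hc rfl
        · exact ih h0 (by simp [ht]) hmem
      · exact ih l (by simp [ht, hl])

-- a needle containing a newline matches no line
theorem pv_loopA_none (needle : List Char) (hmem : '\n' ∈ needle) :
    ∀ (ls : List (List Char)), (∀ l ∈ ls, '\n' ∉ l) → ∀ k, pvLoopA needle ls k = none := by
  intro ls
  induction ls with
  | nil => intro _ k; rfl
  | cons l ls ih =>
    intro h k
    have hni : PySem.Chars.isIn needle l = false :=
      (PySem.Chars.isIn_eq_false_iff _ _).mpr
        (fun hinf => h l (by simp) (hinf.mem hmem))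
    simp [pvLoopA, hni]
    exact ih (fun l' hl' => h l' (by simp [hl'])) (k + 1)

-- ===== VERDICT (by name: the statement is the Claim_ definition above) =====
theorem find_line_number_in_yaml_spec : Claim_equal_find_line_number_in_yaml := by
  intro y fp _hdom hpre
  unfold Pre_find_line_number_in_yaml at hpre
  unfold Spec_find_line_number_in_yaml find_line_number_in_yaml find_line_number_in_yaml_alt
  dsimp only
  set lk := (PySem.Chars.splitOn fp.toList ['.']).getLastD [] with hlk
  by_cases hnlk : '\n' ∈ lk
  case pos =>
    -- the key contains a newline: Pre_ says it does not occur in the text, so both sides are none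
    have hni : PySem.Chars.isIn (lk ++ [':']) y.toList = false := by
      rcases Bool.eq_false_or_eq_true (PySem.Chars.isIn (lk ++ [':']) y.toList) with h | h
      · exact absurd ⟨hnlk, h⟩ hpre
      · exact h
    have hf : PySem.Chars.find y.toList (lk ++ [':']) = -1 :=
      (PySem.Chars.find_eq_neg_one_iff _ _).mpr ((PySem.Chars.isIn_eq_false_iff _ _).mp hni)
    rw [hf, if_pos (by norm_num : (-1 : Int) < 0)]
    by_cases hy : y.toList = []
    · rw [if_pos hy]
    · rw [if_neg hy, pv_splitOn_nl]
      exact pv_loopA_none _ (by simp [hnlk]) _ (pv_splitNL_no_nl y.toList) 0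
  case neg =>
  have hnl : '\n' ∉ lk ++ [':'] := by simp [hnlk]
  have hne : lk ++ [':'] ≠ [] := by simp
  by_cases hy : y.toList = []
  · rw [if_pos hy, hy]
    have hf : PySem.Chars.find [] (lk ++ [':']) = -1 :=
      (PySem.Chars.find_eq_neg_one_iff _ _).mpr (fun h => hne (List.eq_nil_of_infix_nil h))
    rw [hf]
    norm_num
  · rw [if_neg hy, pv_splitOn_nl, pv_main _ hnl hne y.toList 0]
    by_cases hf : PySem.Chars.find y.toList (lk ++ [':']) = -1
    · rw [if_pos hf, hf]
      norm_num
    · have h0 : 0 ≤ PySem.Chars.find y.toList (lk ++ [':']) := by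
        have := PySem.Chars.neg_one_le_find y.toList (lk ++ [':'])
        omega
      rw [if_neg hf, if_neg (by omega), pv_count_singleton]
      push_cast
      ring_nf
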